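-- pv_equiv track=rewrite | github.com/Kaluza05/Studia | zimowy24-25/WdI/lista4/zadanie4.py | potegi_p
-- ===== SOURCE A (Python) =====
-- def max_pow(n,a):
--     pow = 1
--     old_a = a
--     while True:
--         if n%a==0:
--             a *= old_a
--             pow+=1
--         else:
--             return pow-1
--
-- def potegi_p(n,seq): #k długośc seq
--     p = 0
--     for i in seq:
--         if max_pow(n,i) > p:
--             p = max_pow(n,i)
--     spelniajace = [] #jeśli bez tablic pythonowych to wypisywać wartości w if-ie
--     for j in seq:
--         if n%(j**p) == 0:
--             spelniajace.append(j)
--     return p,spelniajace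
-- ===== SOURCE B (Python) =====
-- def potegi_p(n, seq):
--     p = 0
--     best = []
--     for j in seq:
--         m, e = n, 0
--         while m % j == 0:
--             m //= j
--             e += 1
--         if e > p:
--             p, best = e, [j]
--         elif e == p:
--             best.append(j)
--     return p, best
-- ===== Notes on version B (the rewrite author's own statement) =====
-- stated objective: simpler
-- what changed: B is one single pass that computes each element's exponent by repeated division m //= j and maintains the running (best exponent, best list) with reset-or-append, instead of A's two staged scans (a running max of max_pow, which grows powers a *= old_a, then a second scan recomputing n % j**p).
import Mathlib
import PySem

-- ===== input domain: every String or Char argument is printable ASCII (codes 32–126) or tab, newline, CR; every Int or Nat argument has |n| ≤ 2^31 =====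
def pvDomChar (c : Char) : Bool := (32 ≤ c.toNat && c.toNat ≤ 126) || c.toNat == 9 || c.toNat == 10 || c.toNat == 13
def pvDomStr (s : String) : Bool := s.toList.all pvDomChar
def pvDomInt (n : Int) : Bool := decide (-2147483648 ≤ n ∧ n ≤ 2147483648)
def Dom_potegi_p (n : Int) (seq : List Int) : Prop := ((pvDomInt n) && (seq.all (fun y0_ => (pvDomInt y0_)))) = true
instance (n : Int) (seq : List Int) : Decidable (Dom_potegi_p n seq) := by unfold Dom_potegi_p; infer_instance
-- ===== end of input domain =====

-- B replaces A's two staged scans (a running max of max_pow, then a divisibility re-scan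
-- n % j**p == 0) by ONE pass that computes each exponent by repeated division m //= j and
-- maintains (best exponent, best list) with reset-or-append; objective: simpler.

-- ===== PORT A =====
-- the 'while True' loop of max_pow, with fuel; under Pre_ the fuel is never exhausted
def maxPowLoopA (n olda : Int) : Nat → Int → Int → Int
  | 0, _, pow => pow - 1
  | fuel + 1, a, pow =>
      if PySem.Int.mod n a = 0 then maxPowLoopA n olda fuel (a * olda) (pow + 1)
      else pow - 1

def max_powA (n a : Int) : Int := maxPowLoopA n a (n.natAbs + 2) a 1

def potegi_p (n : Int) (seq : List Int) : Int × List Int :=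
  let p := seq.foldl (fun p i => if max_powA n i > p then max_powA n i else p) 0
  let spelniajace :=
    seq.foldl (fun acc j => if PySem.Int.mod n (j ^ p.toNat) = 0 then acc ++ [j] else acc)
      ([] : List Int)
  (p, spelniajace)

-- ===== PORT B =====
-- the 'while m % j == 0: m //= j; e += 1' loop of B, with fuel; under Pre_ it never runs out
def expLoop (j : Int) : Nat → Int → Int → Int × Int
  | 0, m, e => (m, e)
  | fuel + 1, m, e =>
      if PySem.Int.mod m j = 0 then expLoop j fuel (PySem.Int.floordiv m j) (e + 1)
      else (m, e)

def potegi_p_alt (n : Int) (seq : List Int) : Int × List Int :=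
  seq.foldl (fun st j =>
      let e := (expLoop j (n.natAbs + 2) n 0).2
      if e > st.1 then (e, [j])
      else if e = st.1 then (st.1, st.2 ++ [j])
      else st)
    ((0 : Int), ([] : List Int))

-- ===== PRECONDITION & SPEC =====
-- Pre_ excludes exactly the inputs where A does not return: n % 0 raises ZeroDivisionError
-- (some i = 0), and max_pow loops forever when i ∈ {-1, 1} or n = 0 (with seq nonempty).
def Pre_potegi_p (n : Int) (seq : List Int) : Prop :=
  seq = [] ∨ (n ≠ 0 ∧ ∀ i ∈ seq, 2 ≤ i.natAbs)
instance (n : Int) (seq : List Int) : Decidable (Pre_potegi_p n seq) := by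
  unfold Pre_potegi_p; infer_instance

def pvWitness_potegi_p : Int × List Int := (12, [2, 3, 5])

def Spec_potegi_p (n : Int) (seq : List Int) (out : Int × List Int) : Prop := out = potegi_p_alt n seq
instance (n : Int) (seq : List Int) (out : Int × List Int) : Decidable (Spec_potegi_p n seq out) := by unfold Spec_potegi_p; infer_instance

-- ===== CLAIM (what is proved, stated in full; the proofs are below) =====
def Claim_equal_potegi_p : Prop := ∀ (n : Int) (seq : List Int), Dom_potegi_p n seq → Pre_potegi_p n seq → Spec_potegi_p n seq (potegi_p n seq)

-- ===== LEMMAS AND PROOFS =====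

-- no high power of a j with |j| ≥ 2 divides a nonzero n
theorem not_pow_dvd (n j : Int) (hn : n ≠ 0) (hj : 2 ≤ j.natAbs)
    (F : Nat) (hF : n.natAbs + 1 ≤ F) : ¬ j ^ F ∣ n := by
  intro hdvd
  have h1 : (j ^ F).natAbs ∣ n.natAbs := Int.natAbs_dvd_natAbs.mpr hdvd
  have h2 : (j ^ F).natAbs ≤ n.natAbs := Nat.le_of_dvd (by omega) h1
  have h3 : (j ^ F).natAbs = j.natAbs ^ F := by rw [Int.natAbs_pow]
  have h4 : 2 ^ F ≤ j.natAbs ^ F := Nat.pow_le_pow_left hj _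
  have h5 : n.natAbs < 2 ^ F := by
    calc n.natAbs < 2 ^ n.natAbs := Nat.lt_two_pow_self
      _ ≤ 2 ^ F := Nat.pow_le_pow_right (by omega) (by omega)
  omega

-- characterisation of A's fuel loop: if a^(k+fuel) does not divide n the fuel suffices and
-- the loop returns the greatest exponent e with a^e ∣ n
theorem loop_char (n a : Int) :
    ∀ (fuel k : Nat), 1 ≤ k → a ^ (k - 1) ∣ n → ¬ a ^ (k + fuel) ∣ n →
      ∃ e : Nat, maxPowLoopA n a fuel (a ^ k) (k : Int) = (e : Int) ∧
        a ^ e ∣ n ∧ ¬ a ^ (e + 1) ∣ n := by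
  intro fuel
  induction fuel with
  | zero =>
      intro k hk hdvd hnd
      refine ⟨k - 1, ?_, hdvd, ?_⟩
      · simp [maxPowLoopA]; omega
      · have : k - 1 + 1 = k := by omega
        rw [this]; simpa using hnd
  | succ f ih =>
      intro k hk hdvd hnd
      simp only [maxPowLoopA]
      by_cases h : a ^ k ∣ n
      · rw [if_pos (by rw [PySem.Int.mod_eq_zero_iff_dvd]; exact h)]
        have h1 : a ^ k * a = a ^ (k + 1) := by rw [pow_succ]
        have h2 : ((k : Int) + 1) = ((k + 1 : Nat) : Int) := by push_cast; ring
        rw [h1, h2]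
        exact ih (k + 1) (by omega) (by simpa using h) (by
          have : k + 1 + f = k + (f + 1) := by omega
          rw [this]; exact hnd)
      · rw [if_neg (by rw [PySem.Int.mod_eq_zero_iff_dvd]; exact h)]
        refine ⟨k - 1, by omega, hdvd, ?_⟩
        have : k - 1 + 1 = k := by omega
        rw [this]; exact h

-- under the precondition, max_powA returns the greatest exponent
theorem max_powA_char (n a : Int) (hn : n ≠ 0) (ha : 2 ≤ a.natAbs) :
    ∃ e : Nat, max_powA n a = (e : Int) ∧ a ^ e ∣ n ∧ ¬ a ^ (e + 1) ∣ n := by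
  have hbig : ¬ a ^ (1 + (n.natAbs + 2)) ∣ n := not_pow_dvd n a hn ha _ (by omega)
  have := loop_char n a (n.natAbs + 2) 1 (by omega) (by simp) hbig
  simpa [max_powA] using this

-- divisibility by a^k is monotone in k up to the greatest exponent
theorem pow_dvd_iff_le (n a : Int) (e : Nat) (h1 : a ^ e ∣ n) (h2 : ¬ a ^ (e + 1) ∣ n)
    (k : Nat) : a ^ k ∣ n ↔ k ≤ e := by
  constructor
  · intro hk
    by_contra hlt
    exact h2 (dvd_trans (pow_dvd_pow a (by omega)) hk)
  · intro hle
    exact dvd_trans (pow_dvd_pow a hle) h1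

-- the greatest exponent is unique
theorem exp_unique (n j : Int) (e e' : Nat)
    (h1 : j ^ e ∣ n) (h2 : ¬ j ^ (e + 1) ∣ n)
    (h1' : j ^ e' ∣ n) (h2' : ¬ j ^ (e' + 1) ∣ n) : e = e' := by
  have ha := (pow_dvd_iff_le n j e h1 h2 e').mp h1'
  have hb := (pow_dvd_iff_le n j e' h1' h2' e).mp h1
  omega

-- characterisation of B's repeated-division loop
theorem expLoop_char (j : Int) (hj : j ≠ 0) :
    ∀ (fuel : Nat) (m : Int) (e : Int), m ≠ 0 → ¬ j ^ fuel ∣ m →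
      ∃ d : Nat, (expLoop j fuel m e).2 = e + (d : Int) ∧ j ^ d ∣ m ∧ ¬ j ^ (d + 1) ∣ m := by
  intro fuel
  induction fuel with
  | zero =>
      intro m e hm hnd
      exact absurd (by simp) hnd
  | succ f ih =>
      intro m e hm hnd
      simp only [expLoop]
      by_cases h : j ∣ m
      · rw [if_pos (by rw [PySem.Int.mod_eq_zero_iff_dvd]; exact h)]
        obtain ⟨c, hc⟩ := h
        have hdiv : PySem.Int.floordiv m j = c := by
          rw [hc, mul_comm]
          simp only [PySem.Int.floordiv]
          exact Int.mul_fdiv_cancel _ hj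
        have hc0 : c ≠ 0 := by
          intro h0; apply hm; rw [hc, h0, mul_zero]
        have hndc : ¬ j ^ f ∣ c := by
          intro hd; apply hnd
          rw [hc, pow_succ, mul_comm (j ^ f) j]
          exact mul_dvd_mul_left j hd
        obtain ⟨d', hres, hd1, hd2⟩ := ih c (e + 1) hc0 hndc
        refine ⟨d' + 1, ?_, ?_, ?_⟩
        · rw [hdiv, hres]; push_cast; ring
        · rw [hc, pow_succ, mul_comm (j ^ d') j]
          exact mul_dvd_mul_left j hd1
        · intro hd; apply hd2
          have : j ^ (d' + 1 + 1) = j * j ^ (d' + 1) := by ring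
          rw [this, hc] at hd
          exact (mul_dvd_mul_iff_left hj).mp hd
      · rw [if_neg (by rw [PySem.Int.mod_eq_zero_iff_dvd]; exact h)]
        exact ⟨0, by simp, by simp, by simpa using h⟩

-- B's per-element exponent equals A's max_pow under the precondition
theorem expLoop_eq_max_powA (n j : Int) (hn : n ≠ 0) (hj : 2 ≤ j.natAbs) :
    (expLoop j (n.natAbs + 2) n 0).2 = max_powA n j := by
  have hj0 : j ≠ 0 := by
    intro h; rw [h] at hj; simp at hj
  obtain ⟨d, hres, hd1, hd2⟩ :=
    expLoop_char j hj0 (n.natAbs + 2) n 0 hn (not_pow_dvd n j hn hj _ (by omega))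
  obtain ⟨e, he, he1, he2⟩ := max_powA_char n j hn hj
  have := exp_unique n j d e hd1 hd2 he1 he2
  rw [hres, he, this]; ring

-- B's single pass computes the running max and the filter of elements achieving it
theorem fold_inv (E : Int → Int) :
    ∀ (l : List Int) (p : Int) (acc : List Int),
      l.foldl (fun st j =>
          if E j > st.1 then (E j, [j])
          else if E j = st.1 then (st.1, st.2 ++ [j]) else st) (p, acc)
      = ((l.foldl (fun a j => max a (E j)) p),
         if p < l.foldl (fun a j => max a (E j)) p
         then l.filter (fun j => E j == l.foldl (fun a j => max a (E j)) p)
         else acc ++ l.filter (fun j => E j == p)) := by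
  intro l
  induction l with
  | nil => intro p acc; simp
  | cons x t ih =>
      intro p acc
      simp only [List.foldl_cons]
      by_cases h1 : E x > p
      · rw [if_pos h1, ih, max_eq_right (le_of_lt h1)]
        have hxP : E x ≤ t.foldl (fun a j => max a (E j)) (E x) :=
          (PySem.List.le_foldl_max_int t E (E x)).1
        rw [if_pos (lt_of_lt_of_le h1 hxP)]
        by_cases h2 : E x < t.foldl (fun a j => max a (E j)) (E x)
        · rw [if_pos h2]
          simp only [List.filter_cons]
          rw [if_neg (by simp; omega)]
        · rw [if_neg h2]
          have hP : t.foldl (fun a j => max a (E j)) (E x) = E x := by omega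
          simp only [List.filter_cons, hP]
          rw [if_pos (by simp)]
          simp
      · rw [if_neg h1]
        by_cases h2 : E x = p
        · rw [if_pos h2, ih]
          have hmax : max p (E x) = p := by omega
          rw [hmax]
          by_cases h3 : p < t.foldl (fun a j => max a (E j)) p
          · rw [if_pos h3, if_pos h3]
            simp only [List.filter_cons]
            rw [if_neg (by simp; omega)]
          · rw [if_neg h3, if_neg h3]
            simp only [List.filter_cons]
            rw [if_pos (by simp [h2])]
            simp
        · rw [if_neg h2, ih]
          have hmax : max p (E x) = p := by omega
          rw [hmax]
          by_cases h3 : p < t.foldl (fun a j => max a (E j)) p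
          · rw [if_pos h3, if_pos h3]
            simp only [List.filter_cons]
            rw [if_neg (by simp; omega)]
          · rw [if_neg h3, if_neg h3]
            simp only [List.filter_cons]
            rw [if_neg (by simp [h2])]
  -- (end fold_inv)

-- A's running-max loop is foldl max
theorem runmax_eq (n : Int) (seq : List Int) :
    seq.foldl (fun p i => if max_powA n i > p then max_powA n i else p) 0 =
      seq.foldl (fun acc y => max acc (max_powA n y)) 0 := by
  have hfun : (fun (p : Int) i => if max_powA n i > p then max_powA n i else p) =
      (fun (acc : Int) y => max acc (max_powA n y)) := by
    funext p i
    by_cases h : max_powA n i > p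
    · simp [h, max_eq_right (le_of_lt h)]
    · simp [h, max_eq_left (by omega : max_powA n i ≤ p)]
  rw [hfun]

theorem potegi_p_spec_aux (n : Int) (seq : List Int) (hpre : Pre_potegi_p n seq) :
    potegi_p n seq = potegi_p_alt n seq := by
  rcases hpre with hnil | ⟨hn, hall⟩
  · subst hnil; rfl
  · set E : Int → Int := fun i => max_powA n i with hE
    have hchar : ∀ i ∈ seq, ∃ e : Nat, max_powA n i = (e : Int) ∧
        i ^ e ∣ n ∧ ¬ i ^ (e + 1) ∣ n := fun i hi => max_powA_char n i hn (hall i hi)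
    -- B's side: replace the loop body's exponent by E, then apply the invariant
    set P : Int := seq.foldl (fun a j => max a (E j)) 0 with hP
    have hmaxfacts := PySem.List.le_foldl_max_int seq E 0
    have hP0 : 0 ≤ P := by rw [hP]; exact hmaxfacts.1
    have hB : potegi_p_alt n seq = (P, seq.filter (fun j => E j == P)) := by
      unfold potegi_p_alt
      have hcongr := PySem.List.foldl_congr_mem seq
        (fun (st : Int × List Int) j =>
          let e := (expLoop j (n.natAbs + 2) n 0).2
          if e > st.1 then (e, [j])
          else if e = st.1 then (st.1, st.2 ++ [j]) else st)
        (fun (st : Int × List Int) j =>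
          if E j > st.1 then (E j, [j])
          else if E j = st.1 then (st.1, st.2 ++ [j]) else st)
        ((0 : Int), ([] : List Int))
        (by
          intro st j hj
          simp only [hE]
          rw [expLoop_eq_max_powA n j hn (hall j hj)])
      rw [hcongr, fold_inv E seq 0 []]
      rw [← hP]
      by_cases h : (0 : Int) < P
      · rw [if_pos h]
      · rw [if_neg h]
        have : P = 0 := by omega
        rw [this]
        simp
    -- A's side
    set p : Int := seq.foldl (fun p i => if max_powA n i > p then max_powA n i else p) 0 with hp
    have hpP : p = P := by rw [hp, hP, runmax_eq]
    have hple : ∀ i ∈ seq, E i ≤ P := by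
      intro i hi; rw [hP]; exact hmaxfacts.2 i hi
    have hfiltA : seq.foldl
        (fun acc j => if PySem.Int.mod n (j ^ p.toNat) = 0 then acc ++ [j] else acc)
        ([] : List Int) = seq.filter (fun j => decide (PySem.Int.mod n (j ^ p.toNat) = 0)) := by
      rw [PySem.List.foldl_append_ite_eq_filter]
      simp
    have hpred : ∀ j ∈ seq,
        decide (PySem.Int.mod n (j ^ p.toNat) = 0) = (E j == P) := by
      intro j hj
      obtain ⟨e, he, hd1, hd2⟩ := hchar j hj
      have hiff : PySem.Int.mod n (j ^ p.toNat) = 0 ↔ E j = P := by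
        rw [PySem.Int.mod_eq_zero_iff_dvd, pow_dvd_iff_le n j e hd1 hd2]
        constructor
        · intro hle
          have hEj : E j = (e : Int) := he
          have h1 : P ≤ E j := by rw [hEj, hpP] at *; omega
          exact le_antisymm (hple j hj) h1
        · intro heq
          have hEj : E j = (e : Int) := he
          rw [heq] at hEj
          rw [hpP]
          omega
      simp [hiff, BEq.beq]
    simp only [potegi_p]
    rw [hB]
    refine Prod.ext hpP ?_
    simp only [← hp, hfiltA]
    exact List.filter_congr hpred

-- ===== VERDICT (by name: the statement is the Claim_ definition above) =====
theorem potegi_p_spec : Claim_equal_potegi_p := by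
  intro n seq _ hpre
  unfold Spec_potegi_p
  exact potegi_p_spec_aux n seq hpre
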